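-- pv_equiv track=rewrite | github.com/rocketman1243/routing-based-on-user-requirements | 1_limit_stage/generate_features_distribution.py | generate_distribution
-- ===== SOURCE A (Python) =====
-- import random, math
--
-- def generate_distribution(
--     max_number_of_features: int, min_nr_of_features: int, as_numbers: list[str]
-- ):
--     items_per_step = math.ceil(
--         len(as_numbers) / (max_number_of_features - min_nr_of_features)
--     )
--
--     distribution = {}
--
--     counter = 0
--     current_number_of_elements = max_number_of_features - min_nr_of_features
--
--     for i in as_numbers:
--         distribution[i] = current_number_of_elements + min_nr_of_features
--         counter += 1
--
--         if counter >= items_per_step: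
--             counter = 0
--             current_number_of_elements -= 1
--
--     return distribution
-- ===== SOURCE B (Python) =====
-- import math
--
-- def generate_distribution(
--     max_number_of_features: int, min_nr_of_features: int, as_numbers: list[str]
-- ):
--     items_per_step = math.ceil(
--         len(as_numbers) / (max_number_of_features - min_nr_of_features)
--     )
--     distribution = {}
--     value = max_number_of_features
--     remaining = as_numbers
--     while remaining:
--         chunk, remaining = remaining[:items_per_step], remaining[items_per_step:]
--         for key in chunk:
--             distribution[key] = value
--         value -= 1
--     return distribution
-- ===== Notes on version B (the rewrite author's own statement) =====
-- stated objective: alternative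
-- what changed: A's single pass with a running counter and a periodic decrement branch is replaced by a staged chunking loop: the list is repeatedly split into a slice of items_per_step elements and a remainder, each whole chunk is assigned one value, and the value drops once per chunk; Pre_ excludes max <= min, where A raises ZeroDivisionError (max == min) or, for max < min on nonempty input, B's own loop never terminates because the chunk slice is empty.
-- outside the precondition, e.g. on generate_distribution(1, 3, ['a']): A returns {'a': 1}, B does not finish within the time limit; on generate_distribution(1, 3, ['a', 'b']): A returns {'a': 1, 'b': 0}, B does not finish within the time limit
import Mathlib
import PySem

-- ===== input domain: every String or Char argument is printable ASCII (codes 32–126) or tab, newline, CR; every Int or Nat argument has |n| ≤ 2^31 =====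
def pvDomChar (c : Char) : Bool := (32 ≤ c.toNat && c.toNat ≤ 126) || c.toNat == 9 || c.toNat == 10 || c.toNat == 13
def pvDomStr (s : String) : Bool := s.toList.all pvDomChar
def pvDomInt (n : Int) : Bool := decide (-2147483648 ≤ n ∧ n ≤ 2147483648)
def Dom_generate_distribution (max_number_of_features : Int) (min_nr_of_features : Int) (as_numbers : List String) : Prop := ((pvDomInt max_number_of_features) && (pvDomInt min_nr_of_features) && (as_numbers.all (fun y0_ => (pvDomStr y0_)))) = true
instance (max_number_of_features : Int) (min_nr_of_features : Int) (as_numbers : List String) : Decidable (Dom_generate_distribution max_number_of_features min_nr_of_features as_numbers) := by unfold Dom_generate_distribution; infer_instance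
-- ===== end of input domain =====

-- B replaces A's running counter + periodic-decrement pass by a staged chunking loop:
-- split off a slice of items_per_step keys, assign the whole chunk one value, decrement
-- once per chunk (objective: alternative decomposition, same cost).

-- ===== PORT A =====
-- math.ceil(a / b) as exact integer ceiling -((-a) // b); exact on the admitted inputs
-- (list lengths are far below the float-precision threshold).
def pvCeilDiv (a b : Int) : Int := -(PySem.Int.floordiv (-a) b)

def pvALoop (items_per_step min_nr : Int) : List String → PySem.Dict String Int → Int → Int → PySem.Dict String Int
  | [], d, _, _ => d
  | i :: rest, d, counter, current =>
    let d' := d.insert i (current + min_nr)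
    let counter' := counter + 1
    if counter' ≥ items_per_step then
      pvALoop items_per_step min_nr rest d' 0 (current - 1)
    else
      pvALoop items_per_step min_nr rest d' counter' current

def generate_distribution (max_number_of_features : Int) (min_nr_of_features : Int) (as_numbers : List String) : List (String × Int) :=
  let items_per_step := pvCeilDiv (as_numbers.length : Int) (max_number_of_features - min_nr_of_features)
  (pvALoop items_per_step min_nr_of_features as_numbers PySem.Dict.empty 0
      (max_number_of_features - min_nr_of_features)).items

-- ===== PORT B =====
-- Source B's while loop: slice off a chunk, assign it one value, recurse on the remainder.
-- The '1 ≤ step' guard only makes the recursion total: where it fails (step ≤ 0 and a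
-- nonempty list) the Python B never terminates, and Pre_ excludes those inputs.
def pvBLoop (step : Int) (remaining : List String) (d : PySem.Dict String Int) (value : Int) : PySem.Dict String Int :=
  match remaining with
  | [] => d
  | x :: rest =>
    if h : 1 ≤ step then
      let chunk := PySem.List.slice (x :: rest) none (some step)
      let remaining' := PySem.List.slice (x :: rest) (some step) none
      pvBLoop step remaining' (chunk.foldl (fun d k => d.insert k value) d) (value - 1)
    else d
termination_by remaining.length
decreasing_by
  rw [PySem.List.slice_from _ (show (0:Int) ≤ step by omega)]
  simp only [List.length_drop, List.length_cons]
  omega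

def generate_distribution_alt (max_number_of_features : Int) (min_nr_of_features : Int) (as_numbers : List String) : List (String × Int) :=
  let items_per_step := pvCeilDiv (as_numbers.length : Int) (max_number_of_features - min_nr_of_features)
  (pvBLoop items_per_step as_numbers PySem.Dict.empty max_number_of_features).items

-- ===== PRECONDITION & SPEC =====
-- Pre_ excludes max ≤ min: at max = min A raises ZeroDivisionError, and for max < min
-- (a nonsensical range, outside the function's natural domain) B's own loop diverges
-- on nonempty lists; empty lists with max ≠ min stay inside (both return {}).
def Pre_generate_distribution (max_number_of_features : Int) (min_nr_of_features : Int) (as_numbers : List String) : Prop :=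
  min_nr_of_features < max_number_of_features ∨
    (as_numbers = [] ∧ max_number_of_features ≠ min_nr_of_features)
instance (max_number_of_features : Int) (min_nr_of_features : Int) (as_numbers : List String) : Decidable (Pre_generate_distribution max_number_of_features min_nr_of_features as_numbers) := by unfold Pre_generate_distribution; infer_instance
def pvWitness_generate_distribution : Int × Int × List String := (3, 1, ["a", "b", "c"])

def Spec_generate_distribution (max_number_of_features : Int) (min_nr_of_features : Int) (as_numbers : List String) (out : List (String × Int)) : Prop := out = generate_distribution_alt max_number_of_features min_nr_of_features as_numbers
instance (max_number_of_features : Int) (min_nr_of_features : Int) (as_numbers : List String) (out : List (String × Int)) : Decidable (Spec_generate_distribution max_number_of_features min_nr_of_features as_numbers out) := by unfold Spec_generate_distribution; infer_instance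

-- ===== CLAIM (what is proved, stated in full; the proofs are below) =====
def Claim_equal_generate_distribution : Prop := ∀ (max_number_of_features : Int) (min_nr_of_features : Int) (as_numbers : List String), Dom_generate_distribution max_number_of_features min_nr_of_features as_numbers → Pre_generate_distribution max_number_of_features min_nr_of_features as_numbers → Spec_generate_distribution max_number_of_features min_nr_of_features as_numbers (generate_distribution max_number_of_features min_nr_of_features as_numbers)

-- ===== LEMMAS AND PROOFS =====

-- Equation lemmas for the well-founded pvBLoop.
theorem pvBLoop_nil (step : Int) (d : PySem.Dict String Int) (v : Int) :
    pvBLoop step [] d v = d := by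
  unfold pvBLoop
  rfl

theorem pvBLoop_cons (step : Int) (x : String) (rest : List String)
    (d : PySem.Dict String Int) (v : Int) (h : 1 ≤ step) :
    pvBLoop step (x :: rest) d v
      = pvBLoop step (PySem.List.slice (x :: rest) (some step) none)
          ((PySem.List.slice (x :: rest) none (some step)).foldl
            (fun d k => d.insert k v) d) (v - 1) := by
  conv_lhs => unfold pvBLoop
  simp [h]

-- One chunk of A's loop: starting m items before the reset (counter = step - m), A
-- assigns current+mn to the next m items (or all of xs if shorter) and then continues
-- with counter 0 and current-1 — exactly B's chunk step.
theorem pvA_chunk (step mn : Int) :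
    ∀ (xs : List String) (m : Nat) (d : PySem.Dict String Int) (current : Int),
      1 ≤ m → (m : Int) ≤ step →
      pvALoop step mn xs d (step - (m : Int)) current
        = pvALoop step mn (xs.drop m)
            ((xs.take m).foldl (fun d k => d.insert k (current + mn)) d) 0 (current - 1) := by
  intro xs
  induction xs with
  | nil => intro m d current _ _; simp [pvALoop]
  | cons x rest ih =>
    intro m d current hm hms
    by_cases h1 : m = 1
    · subst h1
      simp only [pvALoop, List.drop_succ_cons, List.drop_zero, List.take_succ_cons,
        List.take_zero, List.foldl_cons, List.foldl_nil]
      rw [if_pos (by omega)]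
    · have hm2 : 2 ≤ m := by omega
      simp only [pvALoop]
      rw [if_neg (by omega)]
      have harg : step - (m : Int) + 1 = step - ((m - 1 : Nat) : Int) := by
        omega
      rw [harg, ih (m - 1) (d.insert x (current + mn)) current (by omega) (by omega)]
      have hmm : m = (m - 1) + 1 := by omega
      rw [hmm]
      simp [List.take_succ_cons, List.drop_succ_cons]

-- A's whole loop equals B's chunking loop (value = current + mn), for step ≥ 1.
theorem pvAB (step mn : Int) (hs : 1 ≤ step) :
    ∀ (n : Nat) (xs : List String), xs.length ≤ n → ∀ (d : PySem.Dict String Int) (current : Int),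
      pvALoop step mn xs d 0 current = pvBLoop step xs d (current + mn) := by
  intro n
  induction n with
  | zero =>
    intro xs hlen d current
    have : xs = [] := List.eq_nil_of_length_eq_zero (by omega)
    subst this; simp [pvALoop, pvBLoop_nil]
  | succ n ih =>
    intro xs hlen d current
    cases xs with
    | nil => simp [pvALoop, pvBLoop_nil]
    | cons x rest =>
      have htn : ((step.toNat : Int)) = step := Int.toNat_of_nonneg (by omega)
      have h0 : (0 : Int) = step - (step.toNat : Int) := by omega
      rw [h0, pvA_chunk step mn (x :: rest) step.toNat d current (by omega) (by omega)]
      rw [pvBLoop_cons step x rest d (current + mn) hs]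
      rw [PySem.List.slice_to _ (show (0:Int) ≤ step by omega),
        PySem.List.slice_from _ (show (0:Int) ≤ step by omega)]
      rw [ih ((x :: rest).drop step.toNat) (by simp only [List.length_drop, List.length_cons] at hlen ⊢; omega)]
      have : current - 1 + mn = current + mn - 1 := by ring
      rw [this]

theorem pvStep_pos (n : Nat) (d : Int) (hn : 1 ≤ n) (hd : 0 < d) :
    1 ≤ pvCeilDiv (n : Int) d := by
  unfold pvCeilDiv
  rw [PySem.Int.floordiv_eq_ediv_of_pos hd]
  have : (-(n : Int)) / d < 0 := by
    rw [← PySem.Int.floordiv_eq_ediv_of_pos hd]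
    exact (PySem.Int.floordiv_lt_iff_lt_mul hd).mpr (by omega)
  omega

-- ===== VERDICT (by name: the statement is the Claim_ definition above) =====
theorem generate_distribution_spec : Claim_equal_generate_distribution := by
  intro mx mn xs _ hpre
  unfold Spec_generate_distribution generate_distribution generate_distribution_alt
  cases xs with
  | nil => simp [pvALoop, pvBLoop_nil]
  | cons i rest =>
    have hlt : mn < mx := by
      rcases hpre with h | ⟨h, _⟩
      · exact h
      · simp at h
    have hs : 1 ≤ pvCeilDiv ((i :: rest).length : Int) (mx - mn) :=
      pvStep_pos _ _ (by simp) (by omega)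
    have := pvAB (pvCeilDiv ((i :: rest).length : Int) (mx - mn)) mn hs
      (i :: rest).length (i :: rest) le_rfl PySem.Dict.empty (mx - mn)
    rw [show mx - mn + mn = mx by ring] at this
    exact congrArg PySem.Dict.items this
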